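-- pv_equiv track=rewrite | github.com/Yuli-M/Backend-I | buscarRuta.py | buscar_min_max_costo
-- ===== SOURCE A (Python) =====
-- def buscar_min_max_costo(rutas):
--     if not rutas:
--         return None, None, None, None
--
--     minCosto = float('inf')
--     maxCosto = float('-inf')
--     rutaMin = None#
--     rutaMax = None#
--
--     for ruta, costo in rutas:
--         if costo < minCosto:
--             minCosto = costo
--             rutaMin = ruta #
--         if costo > maxCosto:
--             maxCosto = costo
--             rutaMax = ruta #
--
--     return rutaMin, minCosto, rutaMax, maxCosto
-- ===== SOURCE B (Python) =====
-- def buscar_min_max_costo(rutas):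
--     if not rutas:
--         return None, None, None, None
--     rmin = min(rutas, key=lambda rc: rc[1])
--     rmax = max(rutas, key=lambda rc: rc[1])
--     return rmin[0], rmin[1], rmax[0], rmax[1]
-- ===== Notes on version B (the rewrite author's own statement) =====
-- stated objective: idiomatic
-- what changed: Replaces the hand-written combined accumulator loop with two library reductions min(..., key=...) and max(..., key=...), whose first-extremum tie-breaking matches the original's strict-comparison updates.
import Mathlib
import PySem

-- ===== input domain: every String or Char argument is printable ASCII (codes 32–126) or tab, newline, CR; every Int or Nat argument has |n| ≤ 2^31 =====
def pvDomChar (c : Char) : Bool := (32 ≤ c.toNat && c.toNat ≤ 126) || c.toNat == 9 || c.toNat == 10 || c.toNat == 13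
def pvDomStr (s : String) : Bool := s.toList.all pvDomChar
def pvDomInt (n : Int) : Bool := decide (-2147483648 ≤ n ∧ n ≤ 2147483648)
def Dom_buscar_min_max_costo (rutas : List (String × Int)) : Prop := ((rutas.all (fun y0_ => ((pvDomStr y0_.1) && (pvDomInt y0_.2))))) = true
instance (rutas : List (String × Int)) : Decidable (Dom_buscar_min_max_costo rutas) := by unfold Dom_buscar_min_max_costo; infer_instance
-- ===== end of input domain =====

-- B replaces the combined accumulator loop with two library reductions (min/max by key); idiomatic, same cost.

-- ===== PORT A =====
-- A's loop body; minCosto/maxCosto start as ±infinity, modelled by none (the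
-- comparison against infinity is always true, exactly as in Python since every
-- element is an Int).
def pvAStep (st : Option String × Option Int × Option String × Option Int)
    (rc : String × Int) : Option String × Option Int × Option String × Option Int :=
  let (rutaMin, minCosto, rutaMax, maxCosto) := st
  let (ruta, costo) := rc
  let (rutaMin', minCosto') :=
    match minCosto with
    | none => (some ruta, some costo)
    | some m => if costo < m then (some ruta, some costo) else (rutaMin, minCosto)
  let (rutaMax', maxCosto') :=
    match maxCosto with
    | none => (some ruta, some costo)
    | some m => if costo > m then (some ruta, some costo) else (rutaMax, maxCosto)
  (rutaMin', minCosto', rutaMax', maxCosto')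

def buscar_min_max_costo (rutas : List (String × Int)) :
    Option String × Option Int × Option String × Option Int :=
  if rutas.isEmpty then (none, none, none, none)
  else rutas.foldl pvAStep (none, none, none, none)

-- ===== PORT B =====
def buscar_min_max_costo_alt (rutas : List (String × Int)) :
    Option String × Option Int × Option String × Option Int :=
  if rutas.isEmpty then (none, none, none, none)
  else
    match PySem.List.min? rutas (fun rc => rc.2), PySem.List.max? rutas (fun rc => rc.2) with
    | some rmin, some rmax => (some rmin.1, some rmin.2, some rmax.1, some rmax.2)
    | _, _ => (none, none, none, none)  -- unreachable: rutas is nonempty here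

-- ===== PRECONDITION & SPEC =====
def Spec_buscar_min_max_costo (rutas : List (String × Int)) (out : Option String × Option Int × Option String × Option Int) : Prop := out = buscar_min_max_costo_alt rutas
instance (rutas : List (String × Int)) (out : Option String × Option Int × Option String × Option Int) : Decidable (Spec_buscar_min_max_costo rutas out) := by unfold Spec_buscar_min_max_costo; infer_instance

-- ===== CLAIM (what is proved, stated in full; the proofs are below) =====
def Claim_equal_buscar_min_max_costo : Prop := ∀ (rutas : List (String × Int)), Dom_buscar_min_max_costo rutas → Spec_buscar_min_max_costo rutas (buscar_min_max_costo rutas)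

-- ===== LEMMAS AND PROOFS =====

-- the single-extremum fold steps used by PySem.List.min? / max?
def pvMinStep (acc : Option (String × Int)) (x : String × Int) : Option (String × Int) :=
  match acc with
  | none => some x
  | some m => if x.2 < m.2 then some x else some m

def pvMaxStep (acc : Option (String × Int)) (x : String × Int) : Option (String × Int) :=
  match acc with
  | none => some x
  | some m => if m.2 < x.2 then some x else some m

def pvConv (mn mx : Option (String × Int)) :
    Option String × Option Int × Option String × Option Int :=
  (mn.map Prod.fst, mn.map Prod.snd, mx.map Prod.fst, mx.map Prod.snd)

lemma pvStep_conv (mn mx : Option (String × Int)) (x : String × Int) :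
    pvAStep (pvConv mn mx) x = pvConv (pvMinStep mn x) (pvMaxStep mx x) := by
  cases mn <;> cases mx <;>
    simp only [pvAStep, pvConv, pvMinStep, pvMaxStep, Option.map] <;>
    split_ifs <;> rfl

lemma pvFold_conv (xs : List (String × Int)) (mn mx : Option (String × Int)) :
    xs.foldl pvAStep (pvConv mn mx) =
      pvConv (xs.foldl pvMinStep mn) (xs.foldl pvMaxStep mx) := by
  induction xs generalizing mn mx with
  | nil => rfl
  | cons x t ih => simp only [List.foldl_cons, pvStep_conv, ih]

lemma pvMin?_eq (xs : List (String × Int)) :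
    PySem.List.min? xs (fun rc => rc.2) = xs.foldl pvMinStep none := by
  unfold PySem.List.min?
  congr 1
  funext acc x
  cases acc <;> rfl

lemma pvMax?_eq (xs : List (String × Int)) :
    PySem.List.max? xs (fun rc => rc.2) = xs.foldl pvMaxStep none := by
  unfold PySem.List.max?
  congr 1
  funext acc x
  cases acc <;> rfl

lemma pvFoldMin_some (t : List (String × Int)) (a : String × Int) :
    ∃ p, (a :: t).foldl pvMinStep none = some p := by
  show ∃ p, t.foldl pvMinStep (some a) = some p
  induction t generalizing a with
  | nil => exact ⟨a, rfl⟩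
  | cons y t ih =>
    simp only [List.foldl_cons, pvMinStep]
    split_ifs <;> exact ih _

lemma pvFoldMax_some (t : List (String × Int)) (a : String × Int) :
    ∃ p, (a :: t).foldl pvMaxStep none = some p := by
  show ∃ p, t.foldl pvMaxStep (some a) = some p
  induction t generalizing a with
  | nil => exact ⟨a, rfl⟩
  | cons y t ih =>
    simp only [List.foldl_cons, pvMaxStep]
    split_ifs <;> exact ih _

-- ===== VERDICT (by name: the statement is the Claim_ definition above) =====
theorem buscar_min_max_costo_spec : Claim_equal_buscar_min_max_costo := by
  intro rutas _
  unfold Spec_buscar_min_max_costo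
  cases rutas with
  | nil => rfl
  | cons x t =>
    unfold buscar_min_max_costo buscar_min_max_costo_alt
    simp only [List.isEmpty_cons, if_neg, Bool.false_eq_true, not_false_iff]
    have h : ((none, none, none, none) : Option String × Option Int × Option String × Option Int) = pvConv none none := rfl
    rw [h, pvFold_conv, pvMin?_eq, pvMax?_eq]
    have hmn : ∃ p, (x :: t).foldl pvMinStep none = some p := pvFoldMin_some t x
    have hmx : ∃ p, (x :: t).foldl pvMaxStep none = some p := pvFoldMax_some t x
    obtain ⟨p, hp⟩ := hmn
    obtain ⟨q, hq⟩ := hmx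
    rw [hp, hq]
    rfl
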